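-- pv_equiv track=rewrite | github.com/Aprilllllll/CS50 | plates/plate_final.py | check_num_location
-- ===== SOURCE A (Python) =====
-- def check_num_location(check_context):
--     number_started = False
--     for char in check_context:
--         if not number_started:
--             if char == '0':
--                 return False
--         if char.isdigit():
--             number_started = True
--         if number_started and char.isalpha():
--             return False
--     return True
-- ===== SOURCE B (Python) =====
-- def check_num_location(check_context):
--     i = next((k for k, c in enumerate(check_context) if c.isdigit()), None)
--     if i is None:
--         return True
--     if check_context[i] == '0':
--         return False
--     return not any(c.isalpha() for c in check_context[i + 1:])
-- ===== Notes on version B (the rewrite author's own statement) =====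
-- stated objective: alternative
-- what changed: Replaces the flag-driven single pass with a find-first-digit-index then scan-the-suffix-for-letters decomposition (early return if no digit or if that digit is '0').
import Mathlib
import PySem

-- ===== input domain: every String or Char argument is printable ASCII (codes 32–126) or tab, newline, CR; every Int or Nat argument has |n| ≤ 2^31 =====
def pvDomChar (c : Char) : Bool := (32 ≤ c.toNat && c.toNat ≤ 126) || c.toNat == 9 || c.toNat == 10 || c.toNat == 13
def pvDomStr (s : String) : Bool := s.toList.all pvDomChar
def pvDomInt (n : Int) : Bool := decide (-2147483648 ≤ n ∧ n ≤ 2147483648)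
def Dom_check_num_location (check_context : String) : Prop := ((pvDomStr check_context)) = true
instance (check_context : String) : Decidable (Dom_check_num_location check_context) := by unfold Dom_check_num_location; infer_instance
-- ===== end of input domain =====

-- B replaces A's flag-driven single pass by finding the first digit's index, rejecting if it
-- is '0', and otherwise scanning only the suffix after it for letters (return-value equivalent).

-- ===== PORT A =====
-- the for-loop of A, carrying the number_started flag
def pvA_loop (started : Bool) : List Char → Bool
  | [] => true
  | c :: rest =>
    if !started && (c == '0') then false
    else
      let started' := if PySem.Chars.isdigit c then true else started
      if started' && PySem.Chars.isalpha c then false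
      else pvA_loop started' rest

def check_num_location (check_context : String) : Bool :=
  pvA_loop false check_context.toList

-- ===== PORT B =====
-- next((k for k, c in enumerate(s) if c.isdigit()), None)
def pvFirstDigitIdx : List Char → Option Nat
  | [] => none
  | c :: rest =>
    if PySem.Chars.isdigit c then some 0
    else (pvFirstDigitIdx rest).map (· + 1)

def check_num_location_alt (check_context : String) : Bool :=
  match pvFirstDigitIdx check_context.toList with
  | none => true
  | some i =>
    -- check_context[i]: i is a valid index (it came from enumerate), so getD's default is never used
    if check_context.toList.getD i ' ' == '0' then false
    -- not any(c.isalpha() for c in check_context[i+1:]); slice from the in-range i+1 = drop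
    else !((check_context.toList.drop (i + 1)).any PySem.Chars.isalpha)

-- ===== PRECONDITION & SPEC =====
def Spec_check_num_location (check_context : String) (out : Bool) : Prop := out = check_num_location_alt check_context
instance (check_context : String) (out : Bool) : Decidable (Spec_check_num_location check_context out) := by unfold Spec_check_num_location; infer_instance

-- ===== CLAIM (what is proved, stated in full; the proofs are below) =====
def Claim_equal_check_num_location : Prop := ∀ (check_context : String), Dom_check_num_location check_context → Spec_check_num_location check_context (check_num_location check_context)

-- ===== LEMMAS AND PROOFS =====

-- B's branch structure, stated over the list (proof-side mirror of check_num_location_alt)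
def pvAltL (l : List Char) : Bool :=
  match pvFirstDigitIdx l with
  | none => true
  | some i =>
    if l.getD i ' ' == '0' then false
    else !((l.drop (i + 1)).any PySem.Chars.isalpha)

theorem pvAlt_eq (s : String) : check_num_location_alt s = pvAltL s.toList := rfl

theorem pv_digit_not_alpha (c : Char) (h : PySem.Chars.isdigit c = true) :
    PySem.Chars.isalpha c = false := by
  simp [PySem.Chars.isdigit, Char.le_def, UInt32.le_iff_toNat_le] at h
  simp [PySem.Chars.isalpha, PySem.Chars.isupper, PySem.Chars.islower, Char.le_def,
    UInt32.le_iff_toNat_le]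
  omega

-- once the flag is set, A just scans for a letter
theorem pvA_loop_true (l : List Char) :
    pvA_loop true l = !(l.any PySem.Chars.isalpha) := by
  induction l with
  | nil => rfl
  | cons c rest ih =>
    by_cases h : PySem.Chars.isalpha c = true
    · simp [pvA_loop, h]
    · simp only [Bool.not_eq_true] at h
      simp [pvA_loop, h, ih]

theorem pvA_eq_altL (l : List Char) : pvA_loop false l = pvAltL l := by
  induction l with
  | nil => rfl
  | cons c rest ih =>
    by_cases hd : PySem.Chars.isdigit c = true
    · have ha := pv_digit_not_alpha c hd
      by_cases h0 : c = '0'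
      · simp [pvA_loop, pvAltL, pvFirstDigitIdx, h0, (by decide : PySem.Chars.isdigit '0' = true)]
      · simp [pvA_loop, pvAltL, pvFirstDigitIdx, hd, ha, h0, pvA_loop_true]
    · have h0 : ¬ c = '0' := by
        intro h; apply hd; subst h; decide
      simp only [Bool.not_eq_true] at hd
      simp [pvA_loop, pvAltL, pvFirstDigitIdx, hd, h0, ih]
      cases hfd : pvFirstDigitIdx rest with
      | none => rfl
      | some i => rfl

-- ===== VERDICT (by name: the statement is the Claim_ definition above) =====
theorem check_num_location_spec : Claim_equal_check_num_location := by
  intro s _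
  unfold Spec_check_num_location check_num_location
  rw [pvAlt_eq, pvA_eq_altL]
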